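-- pv_equiv track=rewrite | github.com/pranj2000/Python-Programming-Projects | Collapsing_Intervals/Intervals.py | sort_interval
-- ===== SOURCE A (Python) =====
-- def sort_interval(inter):
--
--     done = False
--     while(not done):
--         num_swaps = 0
--         for i in range(0,len(inter)-1):
--             size = inter[i][1] - inter[i][0]
--             size2 = inter[i+1][1] - inter[i+1][0]
--             if size > size2:
--                 inter[i],inter[i+1] = inter[i+1],inter[i]
--                 num_swaps +=1
--         if num_swaps ==0 :
--             done = True
--
--     return inter
-- ===== SOURCE B (Python) =====
-- def sort_interval(inter):
--     # Stable in-place insertion sort keyed on interval size.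
--     for i in range(1, len(inter)):
--         cur = inter[i]
--         cur_size = cur[1] - cur[0]
--         j = i - 1
--         while j >= 0 and inter[j][1] - inter[j][0] > cur_size:
--             inter[j + 1] = inter[j]
--             j -= 1
--         inter[j + 1] = cur
--     return inter
-- ===== Notes on version B (the rewrite author's own statement) =====
-- stated objective: alternative
-- what changed: Replaces A's repeated bubble-sort passes (swap adjacent intervals until a full pass makes no swap) by a single-sweep stable in-place insertion sort that shifts strictly larger-size intervals right and drops each interval into the opened gap.
-- outside the precondition, e.g. on sort_interval([[1], [2, 3]]): A raises IndexError, B raises IndexError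
import Mathlib
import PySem

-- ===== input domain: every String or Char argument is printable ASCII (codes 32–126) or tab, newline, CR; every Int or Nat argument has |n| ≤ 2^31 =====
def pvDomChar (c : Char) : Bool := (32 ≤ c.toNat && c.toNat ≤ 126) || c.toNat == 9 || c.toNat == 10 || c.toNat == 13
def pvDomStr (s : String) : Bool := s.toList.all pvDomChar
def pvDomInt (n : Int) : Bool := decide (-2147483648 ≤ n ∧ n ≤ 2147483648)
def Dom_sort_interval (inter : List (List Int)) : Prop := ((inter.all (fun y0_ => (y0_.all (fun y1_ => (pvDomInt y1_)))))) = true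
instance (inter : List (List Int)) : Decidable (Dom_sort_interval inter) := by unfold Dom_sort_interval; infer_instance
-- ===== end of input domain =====

-- B replaces A's repeated bubble-sort passes by a single-pass stable insertion sort on the
-- interval size (alternative O(n^2) strategy); both Pythons mutate `inter` in place and the
-- final in-place state equals the returned value for both, so the return-value equivalence
-- proved here also describes the side effect.

-- size of an interval: inter[k][1] - inter[k][0] (exact inside Pre_, where every row has ≥ 2 cells)
def pvSz (l : List Int) : Int := PySem.List.pyGetD l 1 0 - PySem.List.pyGetD l 0 0

-- ===== PORT A =====
-- one in-place pass of A's inner `for` loop: adjacent swap when size is strictly greater,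
-- returning the new list together with num_swaps
def pvPass : List (List Int) → List (List Int) × Nat
  | [] => ([], 0)
  | [x] => ([x], 0)
  | x :: y :: t =>
    if pvSz x > pvSz y then
      let r := pvPass (x :: t)
      (y :: r.1, r.2 + 1)
    else
      let r := pvPass (y :: t)
      (x :: r.1, r.2)
termination_by l => l.length

-- number of size-inversions: the termination measure of A's `while not done` loop
def pvInv : List (List Int) → Nat
  | [] => 0
  | x :: t => t.countP (fun y => decide (pvSz y < pvSz x)) + pvInv t

theorem pvPass_perm (l : List (List Int)) : (pvPass l).1.Perm l := by
  induction l using pvPass.induct with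
  | case1 => simp [pvPass]
  | case2 x => simp [pvPass]
  | case3 x y t h ih =>
    simp only [pvPass, if_pos h]
    exact ((ih.cons y).trans (List.Perm.swap x y t))
  | case4 x y t h ih =>
    simp only [pvPass, if_neg h]
    exact ih.cons x

-- cited by pvBubble's decreasing_by: each pass removes exactly num_swaps inversions
theorem pvInv_pass (l : List (List Int)) : pvInv (pvPass l).1 + (pvPass l).2 = pvInv l := by
  induction l using pvPass.induct with
  | case1 => simp [pvPass, pvInv]
  | case2 x => simp [pvPass, pvInv]
  | case3 x y t h ih =>
    simp only [pvPass, if_pos h, pvInv] at *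
    rw [(pvPass_perm (x :: t)).countP_eq]
    simp only [List.countP_cons]
    have hxy : ¬ pvSz x < pvSz y := by omega
    simp [hxy, h]
    omega
  | case4 x y t h ih =>
    simp only [pvPass, if_neg h, pvInv] at *
    rw [(pvPass_perm (y :: t)).countP_eq]
    simp only [List.countP_cons]
    have hxy : ¬ pvSz y < pvSz x := by omega
    simp [hxy]
    omega

-- A's `while not done` loop: repeat the pass until a pass makes no swap
def pvBubble (l : List (List Int)) : List (List Int) :=
  if (pvPass l).2 = 0 then (pvPass l).1 else pvBubble (pvPass l).1
termination_by pvInv l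
decreasing_by
  have := pvInv_pass l
  omega

def sort_interval (inter : List (List Int)) : List (List Int) := pvBubble inter

-- ===== PORT B =====
-- B's inner `while` loop: walk the already-sorted prefix from the right (given reversed),
-- shifting every strictly larger element into acc, and drop x into the gap
def pvInsRAux (x : List Int) : List (List Int) → List (List Int) → List (List Int)
  | [], acc => x :: acc
  | y :: rest, acc =>
    if pvSz y > pvSz x then pvInsRAux x rest (y :: acc)
    else rest.reverse ++ y :: x :: acc

-- insert x into the prefix s (scanning from its right end), as Source B's while loop does
def pvInsR (s : List (List Int)) (x : List Int) : List (List Int) :=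
  pvInsRAux x s.reverse []

def sort_interval_alt (inter : List (List Int)) : List (List Int) :=
  inter.foldl pvInsR []

-- ===== PRECONDITION & SPEC =====
-- Pre_ excludes exactly the inputs where the Pythons raise IndexError: a list of ≥ 2 rows
-- in which some row has fewer than 2 cells (inter[i][1]/inter[i][0] fails).
def Pre_sort_interval (inter : List (List Int)) : Prop :=
  2 ≤ inter.length → ∀ l ∈ inter, 2 ≤ l.length
instance (inter : List (List Int)) : Decidable (Pre_sort_interval inter) := by
  unfold Pre_sort_interval; infer_instance

def pvWitness_sort_interval : List (List Int) := [[0, 3], [1, 2]]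

def Spec_sort_interval (inter : List (List Int)) (out : List (List Int)) : Prop := out = sort_interval_alt inter
instance (inter : List (List Int)) (out : List (List Int)) : Decidable (Spec_sort_interval inter out) := by unfold Spec_sort_interval; infer_instance

-- ===== CLAIM (what is proved, stated in full; the proofs are below) =====
def Claim_equal_sort_interval : Prop := ∀ (inter : List (List Int)), Dom_sort_interval inter → Pre_sort_interval inter → Spec_sort_interval inter (sort_interval inter)

-- ===== LEMMAS AND PROOFS =====

-- the comparator of Python's stable sort keyed on pvSz
def pvLt (a b : List Int) : Bool := decide (pvSz a < pvSz b)

-- inserting two elements in either order gives the same list when the keys are strictly ordered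
theorem pvInsert_comm (a b : List Int) (hab : pvSz a < pvSz b) (s : List (List Int)) :
    PySem.List.insertBy pvLt a (PySem.List.insertBy pvLt b s)
      = PySem.List.insertBy pvLt b (PySem.List.insertBy pvLt a s) := by
  induction s with
  | nil =>
    simp [PySem.List.insertBy, pvLt, hab, not_lt.mpr (le_of_lt hab)]
  | cons c t ih =>
    by_cases hbc : pvSz b < pvSz c
    · have hac : pvSz a < pvSz c := lt_trans hab hbc
      simp [PySem.List.insertBy, pvLt, hab, hbc, hac, not_lt.mpr (le_of_lt hab)]
    · by_cases hac : pvSz a < pvSz c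
      · simp [PySem.List.insertBy, pvLt, hbc, hac, not_lt.mpr (le_of_lt hab)]
      · simp only [PySem.List.insertBy, pvLt, hbc, hac, decide_false, Bool.false_eq_true,
          if_false]
        rw [ih]

-- one bubble pass does not change what the stable insertion fold produces
theorem pvPass_foldl_ins (l : List (List Int)) :
    ∀ acc, (pvPass l).1.foldl (fun acc x => PySem.List.insertBy pvLt x acc) acc
      = l.foldl (fun acc x => PySem.List.insertBy pvLt x acc) acc := by
  induction l using pvPass.induct with
  | case1 => intro acc; simp [pvPass]
  | case2 x => intro acc; simp [pvPass]
  | case3 x y t h ih =>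
    intro acc
    simp only [pvPass, if_pos h, List.foldl_cons]
    rw [ih, List.foldl_cons, pvInsert_comm y x h]
  | case4 x y t h ih =>
    intro acc
    simp only [pvPass, if_neg h, List.foldl_cons]
    rw [ih, List.foldl_cons]

-- a pass with zero swaps leaves the list unchanged and certifies it adjacent-nondecreasing
theorem pvPass_zero (l : List (List Int)) (h : (pvPass l).2 = 0) :
    (pvPass l).1 = l ∧ List.IsChain (fun a b => pvSz a ≤ pvSz b) l := by
  induction l using pvPass.induct with
  | case1 => simp [pvPass]
  | case2 x => exact ⟨by simp [pvPass], List.IsChain.singleton x⟩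
  | case3 x y t hgt ih =>
    simp [pvPass, if_pos hgt] at h
  | case4 x y t hgt ih =>
    simp only [pvPass, if_neg hgt] at h ⊢
    obtain ⟨h1, h2⟩ := ih h
    exact ⟨by rw [h1], List.IsChain.cons_cons (by omega) h2⟩

-- stability: a list already nondecreasing in the key is its own stable sort
theorem pvSorted_of_pairwise (l : List (List Int))
    (h : List.Pairwise (fun a b => pvSz a ≤ pvSz b) l) :
    PySem.List.sorted l pvSz = l := by
  induction l using List.reverseRecOn with
  | nil => rfl
  | append_singleton p x ih =>
    have hp : List.Pairwise (fun a b => pvSz a ≤ pvSz b) p :=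
      List.Pairwise.sublist (List.sublist_append_left p [x]) h
    have hle : ∀ y ∈ p, pvSz y ≤ pvSz x := by
      intro y hy
      exact (List.pairwise_append.mp h).2.2 y hy x (by simp)
    rw [PySem.List.sorted_eq_foldl_insertBy, List.foldl_append, List.foldl_cons, List.foldl_nil,
        ← PySem.List.sorted_eq_foldl_insertBy, ih hp]
    refine PySem.List.insertBy_of_forall_not_before _ x p (fun y hy => ?_)
    have := hle y hy
    simp only [decide_eq_false_iff_not]
    omega

-- A's port computes the stable sort keyed on pvSz
theorem pvBubble_eq_sorted (l : List (List Int)) :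
    pvBubble l = PySem.List.sorted l pvSz := by
  induction l using pvBubble.induct with
  | case1 l hz =>
    rw [pvBubble]
    simp only [if_pos hz]
    obtain ⟨h1, h2⟩ := pvPass_zero l hz
    haveI : Trans (fun a b : List Int => pvSz a ≤ pvSz b) (fun a b : List Int => pvSz a ≤ pvSz b)
        (fun a b : List Int => pvSz a ≤ pvSz b) := ⟨fun hab hbc => le_trans hab hbc⟩
    rw [h1, pvSorted_of_pairwise l h2.pairwise]
  | case2 l hz ih =>
    rw [pvBubble]
    simp only [if_neg hz]
    rw [ih, PySem.List.sorted_eq_foldl_insertBy, PySem.List.sorted_eq_foldl_insertBy]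
    exact pvPass_foldl_ins l []

-- insertBy commutes with a final element the inserted key precedes
theorem pvInsertBy_append (x y : List Int) (p : List (List Int)) (h : pvLt x y = true) :
    PySem.List.insertBy pvLt x (p ++ [y]) = PySem.List.insertBy pvLt x p ++ [y] := by
  induction p with
  | nil => simp [PySem.List.insertBy, h]
  | cons c t ih =>
    by_cases hc : pvLt x c = true
    · simp [PySem.List.insertBy, hc]
    · simp [PySem.List.insertBy, hc, ih]

-- B's right-to-left shifting insertion equals stable insertBy on a sorted prefix
theorem pvInsRAux_eq (x : List Int) (s : List (List Int))
    (h : List.Pairwise (fun a b => pvSz a ≤ pvSz b) s) :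
    ∀ acc, pvInsRAux x s.reverse acc = PySem.List.insertBy pvLt x s ++ acc := by
  induction s using List.reverseRecOn with
  | nil => intro acc; rfl
  | append_singleton p y ih =>
    intro acc
    have hp : List.Pairwise (fun a b => pvSz a ≤ pvSz b) p :=
      List.Pairwise.sublist (List.sublist_append_left p [y]) h
    rw [List.reverse_append]
    by_cases hyx : pvSz y > pvSz x
    · simp only [List.reverse_cons, List.reverse_nil, List.nil_append, List.cons_append,
        List.nil_append, pvInsRAux, if_pos hyx]
      rw [ih hp (y :: acc), pvInsertBy_append x y p (by simp [pvLt]; omega)]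
      simp
    · simp only [List.reverse_cons, List.reverse_nil, List.nil_append, List.cons_append,
        List.nil_append, pvInsRAux, if_neg hyx]
      have hall : ∀ z ∈ p ++ [y], pvLt x z = false := by
        intro z hz
        rcases List.mem_append.mp hz with hz | hz
        · have : pvSz z ≤ pvSz y := (List.pairwise_append.mp h).2.2 z hz y (by simp)
          simp [pvLt]; omega
        · simp at hz; subst hz; simp [pvLt]; omega
      rw [PySem.List.insertBy_of_forall_not_before _ x (p ++ [y]) hall]
      simp

-- folding B's insertion over the rest of the input extends the stable sort of the prefix
theorem pvFoldl_insR (t : List (List Int)) :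
    ∀ p, t.foldl pvInsR (PySem.List.sorted p pvSz) = PySem.List.sorted (p ++ t) pvSz := by
  induction t with
  | nil => intro p; simp
  | cons x t ih =>
    intro p
    have hs : pvInsR (PySem.List.sorted p pvSz) x = PySem.List.sorted (p ++ [x]) pvSz := by
      rw [pvInsR, pvInsRAux_eq x (PySem.List.sorted p pvSz) (PySem.List.sorted_pairwise p pvSz) [],
          List.append_nil, PySem.List.sorted_eq_foldl_insertBy (p ++ [x]),
          List.foldl_append, List.foldl_cons, List.foldl_nil,
          ← PySem.List.sorted_eq_foldl_insertBy]
      rfl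
    rw [List.foldl_cons, hs, ih (p ++ [x])]
    simp

-- B's port also computes the stable sort keyed on pvSz
theorem pvAlt_eq_sorted (l : List (List Int)) :
    sort_interval_alt l = PySem.List.sorted l pvSz := by
  have := pvFoldl_insR l []
  simpa [sort_interval_alt, PySem.List.sorted] using this

-- ===== VERDICT (by name: the statement is the Claim_ definition above) =====
theorem sort_interval_spec : Claim_equal_sort_interval := by
  intro inter _ _
  unfold Spec_sort_interval sort_interval
  rw [pvBubble_eq_sorted, pvAlt_eq_sorted]
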